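-- pv_equiv track=rewrite | github.com/pection-zz/aboutme | InternshipProject/trackHand/Image_Proces.py | FindLeftPoint
-- ===== SOURCE A (Python) =====
-- def FindLeftPoint(dataHullx,dataHully,datax,datay):
--     LastPointx,LastPointy,mindatax,mindatay=list(),list(),list(),list()
--     assert len(datax) == len(datay)
--     assert len(dataHullx) == len(dataHully)
--     for y in range(0,len(dataHully)):
--         for i in range(0,len(datay)):
--             if abs(dataHully[y] -datay[i])<=20:
--                 mindatax.append(datax[i])
--                 mindatay.append(datay[i])
--         index = mindatax.index(min(mindatax))
--         LastPointx.append(mindatax[index])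
--         LastPointy.append(mindatay[index])
--         mindatax,mindatay =[],[]
--     return LastPointx,LastPointy
-- ===== SOURCE B (Python) =====
-- def FindLeftPoint(dataHullx, dataHully, datax, datay):
--     assert len(datax) == len(datay)
--     assert len(dataHullx) == len(dataHully)
--     # sort the points once by (x, original index); per hull point take the first one in the y-window
--     pts = sorted(((x, i, y) for i, (x, y) in enumerate(zip(datax, datay))),
--                  key=lambda p: (p[0], p[1]))
--     LastPointx, LastPointy = [], []
--     for h in dataHully:
--         x, _, y = next(p for p in pts if abs(h - p[2]) <= 20)
--         LastPointx.append(x)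
--         LastPointy.append(y)
--     return LastPointx, LastPointy
-- ===== Notes on version B (the rewrite author's own statement) =====
-- stated objective: faster
-- what changed: Instead of re-scanning all data and building/min/indexing fresh candidate lists for every hull point, B sorts the data points once by (x, original index) and answers each hull point by taking the first sorted point inside the y-window (early exit), which is exactly the min-x/first-index choice.
import Mathlib
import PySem

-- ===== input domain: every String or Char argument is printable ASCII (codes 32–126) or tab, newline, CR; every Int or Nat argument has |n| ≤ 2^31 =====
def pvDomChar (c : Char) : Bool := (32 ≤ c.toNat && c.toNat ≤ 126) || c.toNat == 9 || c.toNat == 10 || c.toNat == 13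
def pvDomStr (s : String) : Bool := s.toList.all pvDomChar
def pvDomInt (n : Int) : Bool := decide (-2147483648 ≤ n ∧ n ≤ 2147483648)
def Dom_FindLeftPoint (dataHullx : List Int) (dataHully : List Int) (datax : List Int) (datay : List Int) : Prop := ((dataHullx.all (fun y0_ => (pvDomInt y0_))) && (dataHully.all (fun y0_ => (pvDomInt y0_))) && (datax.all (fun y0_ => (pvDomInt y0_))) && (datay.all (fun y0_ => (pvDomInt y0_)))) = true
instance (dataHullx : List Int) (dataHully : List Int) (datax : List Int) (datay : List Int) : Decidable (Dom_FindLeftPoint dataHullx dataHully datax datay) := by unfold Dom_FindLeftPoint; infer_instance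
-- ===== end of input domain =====

-- B sorts the data points once by (x, original index) and answers each hull point with the
-- first sorted point whose y lies in the ±20 window, instead of rebuilding candidate lists
-- and running min/index passes per hull point (objective: faster; measured faster in a timing run).

-- ===== PORT A =====
def FindLeftPoint (dataHullx : List Int) (dataHully : List Int) (datax : List Int) (datay : List Int) : List Int × List Int :=
  -- the two asserts raise AssertionError on unequal lengths: excluded by Pre_
  (PySem.List.pyRange 0 (PySem.List.len dataHully)).foldl
    (fun st y =>
      let md : List Int × List Int :=
        (PySem.List.pyRange 0 (PySem.List.len datay)).foldl
          (fun md i =>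
            if (PySem.List.pyGetD dataHully y 0 - PySem.List.pyGetD datay i 0).natAbs ≤ 20 then
              (md.1 ++ [PySem.List.pyGetD datax i 0], md.2 ++ [PySem.List.pyGetD datay i 0])
            else md)
          ([], [])
      match PySem.List.min? md.1 (fun x => x) with
      | none => st        -- Python raises ValueError (min of empty list): excluded by Pre_
      | some m =>
        match PySem.List.index? md.1 m with
        | none => st      -- unreachable: the minimum is a member
        | some k =>
          (st.1 ++ [PySem.List.pyGetD md.1 (k : Int) 0], st.2 ++ [PySem.List.pyGetD md.2 (k : Int) 0]))
    ([], [])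

-- ===== PORT B =====
def FindLeftPoint_alt (dataHullx : List Int) (dataHully : List Int) (datax : List Int) (datay : List Int) : List Int × List Int :=
  let pts : List (Int × Int × Int) :=
    PySem.List.sorted2
      ((PySem.List.enumerate (datax.zip datay)).map (fun p => (p.2.1, p.1, p.2.2)))
      (fun t => t.1) (fun t => t.2.1)
  dataHully.foldl
    (fun st h =>
      match pts.find? (fun t => decide ((h - t.2.2).natAbs ≤ 20)) with
      | some t => (st.1 ++ [t.1], st.2 ++ [t.2.2])
      | none => st)     -- Python raises StopIteration (no point in the window): excluded by Pre_
    ([], [])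

-- ===== PRECONDITION & SPEC =====
-- Pre_ excludes exactly the inputs where A raises: unequal lengths (AssertionError) and hull
-- points with no data point inside the ±20 y-window (ValueError from min([])).
def Pre_FindLeftPoint (dataHullx : List Int) (dataHully : List Int) (datax : List Int) (datay : List Int) : Prop :=
  datax.length = datay.length ∧ dataHullx.length = dataHully.length ∧
  ∀ h ∈ dataHully, ∃ yv ∈ datay, (h - yv).natAbs ≤ 20
instance (dataHullx : List Int) (dataHully : List Int) (datax : List Int) (datay : List Int) : Decidable (Pre_FindLeftPoint dataHullx dataHully datax datay) := by unfold Pre_FindLeftPoint; infer_instance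
def pvWitness_FindLeftPoint : List Int × List Int × List Int × List Int := ([3], [5], [1, 2], [9, -4])
def Spec_FindLeftPoint (dataHullx : List Int) (dataHully : List Int) (datax : List Int) (datay : List Int) (out : List Int × List Int) : Prop := out = FindLeftPoint_alt dataHullx dataHully datax datay
instance (dataHullx : List Int) (dataHully : List Int) (datax : List Int) (datay : List Int) (out : List Int × List Int) : Decidable (Spec_FindLeftPoint dataHullx dataHully datax datay out) := by unfold Spec_FindLeftPoint; infer_instance

-- ===== CLAIM (what is proved, stated in full; the proofs are below) =====
def Claim_equal_FindLeftPoint : Prop := ∀ (dataHullx : List Int) (dataHully : List Int) (datax : List Int) (datay : List Int), Dom_FindLeftPoint dataHullx dataHully datax datay → Pre_FindLeftPoint dataHullx dataHully datax datay → Spec_FindLeftPoint dataHullx dataHully datax datay (FindLeftPoint dataHullx dataHully datax datay)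

-- ===== LEMMAS AND PROOFS =====

-- the enumerated data points as (x, index, y) triples, B's comparison key order
def pvEmb (p : Int × (Int × Int)) : Int × Int × Int := (p.2.1, p.1, p.2.2)
def pvT (datax datay : List Int) : List (Int × Int × Int) :=
  (PySem.List.enumerate (datax.zip datay)).map pvEmb
def pvP (h : Int) (t : Int × Int × Int) : Bool := decide ((h - t.2.2).natAbs ≤ 20)
def pvWin (datax datay : List Int) (h : Int) : List (Int × Int × Int) :=
  (pvT datax datay).filter (pvP h)
-- the lexicographic order on the (x, index) key components; index components are distinct,
-- so B's sort never compares the y components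
def pvLe (a b : Int × Int × Int) : Prop := a.1 < b.1 ∨ (a.1 = b.1 ∧ a.2.1 ≤ b.2.1)
def pvBefore (a b : Int × Int × Int) : Bool :=
  decide (a.1 < b.1) || (!decide (b.1 < a.1) && decide (a.2.1 < b.2.1))

-- A's per-hull-point step, after the inner loop is recognised as a filter
def pvStepA (datax datay : List Int) (st : List Int × List Int) (h : Int) : List Int × List Int :=
  match PySem.List.min? ((pvWin datax datay h).map (fun t => t.1)) (fun x => x) with
  | none => st
  | some m =>
    match PySem.List.index? ((pvWin datax datay h).map (fun t => t.1)) m with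
    | none => st
    | some k =>
      (st.1 ++ [PySem.List.pyGetD ((pvWin datax datay h).map (fun t => t.1)) (k : Int) 0],
       st.2 ++ [PySem.List.pyGetD ((pvWin datax datay h).map (fun t => t.2.2)) (k : Int) 0])

-- B's per-hull-point step
def pvStepB (datax datay : List Int) (st : List Int × List Int) (h : Int) : List Int × List Int :=
  match (PySem.List.sorted2 (pvT datax datay) (fun t => t.1) (fun t => t.2.1)).find? (pvP h) with
  | some t => (st.1 ++ [t.1], st.2 ++ [t.2.2])
  | none => st

-- a loop over range(len(xs)) reading xs[y] is a loop over xs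
lemma pv_foldl_getD {α β : Type} (xs : List α) (d : α) (F : β → α → β) (init : β) :
    (PySem.List.pyRange 0 (PySem.List.len xs)).foldl (fun st y => F st (PySem.List.pyGetD xs y d)) init
      = xs.foldl F init := by
  conv_rhs => rw [← PySem.List.map_pyGetD_pyRange_zero xs d]
  rw [List.foldl_map]

lemma pv_range_map_pairs (datax datay : List Int) (hlen : datax.length = datay.length) :
    (PySem.List.pyRange 0 (PySem.List.len datay)).map
        (fun i => (PySem.List.pyGetD datax i 0, PySem.List.pyGetD datay i 0))
      = datax.zip datay := by
  have h1 : (datax.zip datay).length = datay.length := by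
    rw [List.length_zip, hlen, min_self]
  conv_rhs => rw [← PySem.List.map_pyGetD_pyRange_zero (datax.zip datay) ((0:Int),(0:Int))]
  have h2 : PySem.List.len (datax.zip datay) = PySem.List.len datay := by
    simp [PySem.List.len, h1]
  rw [h2]
  apply List.map_congr_left
  intro j hj
  rw [PySem.List.mem_pyRange_one] at hj
  obtain ⟨hj0, hj1⟩ := hj
  have hn : j = (j.toNat : Int) := (Int.toNat_of_nonneg hj0).symm
  rw [hn]
  simp only [PySem.List.pyGetD_natCast]
  have hy : j.toNat < datay.length := by
    simp [PySem.List.len] at hj1; omega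
  have hx : j.toNat < datax.length := by omega
  have hz : j.toNat < (datax.zip datay).length := by omega
  rw [List.getD_eq_getElem _ _ hx, List.getD_eq_getElem _ _ hy, List.getD_eq_getElem _ _ hz,
      List.getElem_zip]

lemma pv_filter_zip (datax datay : List Int) (h : Int) :
    ((datax.zip datay).filter (fun p => decide ((h - p.2).natAbs ≤ 20))).map (fun p => p.1)
        = (pvWin datax datay h).map (fun t => t.1)
    ∧ ((datax.zip datay).filter (fun p => decide ((h - p.2).natAbs ≤ 20))).map (fun p => p.2)
        = (pvWin datax datay h).map (fun t => t.2.2) := by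
  have key : ∀ (l : List (Int × (Int × Int))),
      (((l.map (fun x => x.2)).filter (fun p => decide ((h - p.2).natAbs ≤ 20))).map (fun p => p.1)
          = ((l.map pvEmb).filter (pvP h)).map (fun t => t.1))
      ∧ (((l.map (fun x => x.2)).filter (fun p => decide ((h - p.2).natAbs ≤ 20))).map (fun p => p.2)
          = ((l.map pvEmb).filter (pvP h)).map (fun t => t.2.2)) := by
    intro l
    constructor <;> (simp [List.filter_map, List.map_map, pvEmb, pvP, Function.comp_def]; rfl)
  have hz := PySem.List.map_snd_enumerate (datax.zip datay) 0
  have hkey := key (PySem.List.enumerate (datax.zip datay))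
  rw [hz] at hkey
  exact hkey

-- the inner loop of A builds exactly the x- and y-projections of the window
lemma pv_inner_eq (datax datay : List Int) (hlen : datax.length = datay.length) (h : Int) :
    (PySem.List.pyRange 0 (PySem.List.len datay)).foldl
        (fun md i =>
          if (h - PySem.List.pyGetD datay i 0).natAbs ≤ 20 then
            (md.1 ++ [PySem.List.pyGetD datax i 0], md.2 ++ [PySem.List.pyGetD datay i 0])
          else md)
        (([], []) : List Int × List Int)
      = ((pvWin datax datay h).map (fun t => t.1), (pvWin datax datay h).map (fun t => t.2.2)) := by
  have e0 : (PySem.List.pyRange 0 (PySem.List.len datay)).foldl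
        (fun md i =>
          if (h - PySem.List.pyGetD datay i 0).natAbs ≤ 20 then
            (md.1 ++ [PySem.List.pyGetD datax i 0], md.2 ++ [PySem.List.pyGetD datay i 0])
          else md)
        (([], []) : List Int × List Int)
      = (datax.zip datay).foldl
          (fun md p => if (h - p.2).natAbs ≤ 20 then (md.1 ++ [p.1], md.2 ++ [p.2]) else md)
          ([], []) := by
    conv_rhs => rw [← pv_range_map_pairs datax datay hlen]
    rw [List.foldl_map]
  rw [e0]
  have e1 : (fun (md : List Int × List Int) (p : Int × Int) =>
        if (h - p.2).natAbs ≤ 20 then (md.1 ++ [p.1], md.2 ++ [p.2]) else md)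
      = (fun md p =>
          ((fun (l : List Int) (p : Int × Int) => if (h - p.2).natAbs ≤ 20 then l ++ [p.1] else l) md.1 p,
           (fun (l : List Int) (p : Int × Int) => if (h - p.2).natAbs ≤ 20 then l ++ [p.2] else l) md.2 p)) := by
    funext md p
    by_cases hc : (h - p.2).natAbs ≤ 20 <;> simp [hc]
  rw [e1, PySem.List.foldl_prod_mk
        (f := fun (l : List Int) (p : Int × Int) => if (h - p.2).natAbs ≤ 20 then l ++ [p.1] else l)
        (g := fun (l : List Int) (p : Int × Int) => if (h - p.2).natAbs ≤ 20 then l ++ [p.2] else l)]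
  rw [PySem.List.foldl_append_ite (fun p : Int × Int => (h - p.2).natAbs ≤ 20) (fun p => p.1),
      PySem.List.foldl_append_ite (fun p : Int × Int => (h - p.2).natAbs ≤ 20) (fun p => p.2)]
  simp only [List.nil_append]
  rw [(pv_filter_zip datax datay h).1, (pv_filter_zip datax datay h).2]

lemma pv_B_eq (dataHullx dataHully datax datay : List Int) :
    FindLeftPoint_alt dataHullx dataHully datax datay
      = dataHully.foldl (pvStepB datax datay) ([], []) := rfl

lemma pv_A_eq (dataHullx dataHully datax datay : List Int) (hlen : datax.length = datay.length) :
    FindLeftPoint dataHullx dataHully datax datay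
      = dataHully.foldl (pvStepA datax datay) ([], []) := by
  unfold FindLeftPoint
  refine Eq.trans (pv_foldl_getD dataHully 0
          (fun st h =>
            let md : List Int × List Int :=
              (PySem.List.pyRange 0 (PySem.List.len datay)).foldl
                (fun md i =>
                  if (h - PySem.List.pyGetD datay i 0).natAbs ≤ 20 then
                    (md.1 ++ [PySem.List.pyGetD datax i 0], md.2 ++ [PySem.List.pyGetD datay i 0])
                  else md)
                ([], [])
            match PySem.List.min? md.1 (fun x => x) with
            | none => st
            | some m =>
              match PySem.List.index? md.1 m with
              | none => st
              | some k =>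
                (st.1 ++ [PySem.List.pyGetD md.1 (k : Int) 0], st.2 ++ [PySem.List.pyGetD md.2 (k : Int) 0]))
          ([], [])) ?_
  apply PySem.List.foldl_congr_mem
  intro st h _
  show (let md : List Int × List Int :=
          (PySem.List.pyRange 0 (PySem.List.len datay)).foldl
            (fun md i =>
              if (h - PySem.List.pyGetD datay i 0).natAbs ≤ 20 then
                (md.1 ++ [PySem.List.pyGetD datax i 0], md.2 ++ [PySem.List.pyGetD datay i 0])
              else md)
            ([], [])
        match PySem.List.min? md.1 (fun x => x) with
        | none => st
        | some m =>
          match PySem.List.index? md.1 m with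
          | none => st
          | some k =>
            (st.1 ++ [PySem.List.pyGetD md.1 (k : Int) 0], st.2 ++ [PySem.List.pyGetD md.2 (k : Int) 0]))
      = pvStepA datax datay st h
  rw [pv_inner_eq datax datay hlen h]
  rfl

lemma pvLe_trans {a b c : Int × Int × Int} (h1 : pvLe a b) (h2 : pvLe b c) : pvLe a c := by
  unfold pvLe at *; omega

lemma pv_insertBy_pairwise (x : Int × Int × Int) (ys : List (Int × Int × Int))
    (h : ys.Pairwise pvLe) : (PySem.List.insertBy pvBefore x ys).Pairwise pvLe := by
  induction ys with
  | nil => simp [PySem.List.insertBy]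
  | cons y ys ih =>
    rw [List.pairwise_cons] at h
    by_cases hb : pvBefore x y = true
    · have hxy : pvLe x y := by simp [pvBefore] at hb; unfold pvLe; omega
      rw [PySem.List.insertBy, if_pos hb]
      rw [List.pairwise_cons]
      refine ⟨?_, List.pairwise_cons.mpr h⟩
      intro z hz
      rcases List.mem_cons.mp hz with h2 | h2
      · rw [h2]; exact hxy
      · exact pvLe_trans hxy (h.1 z h2)
    · have hyx : pvLe y x := by simp [pvBefore] at hb; unfold pvLe; omega
      rw [PySem.List.insertBy, if_neg hb]
      rw [List.pairwise_cons]
      refine ⟨?_, ih h.2⟩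
      intro z hz
      rcases (PySem.List.mem_insertBy pvBefore x z ys).mp hz with h2 | h2
      · rw [h2]; exact hyx
      · exact h.1 z h2

lemma pv_sorted2_pairwise (T : List (Int × Int × Int)) :
    (PySem.List.sorted2 T (fun t => t.1) (fun t => t.2.1)).Pairwise pvLe := by
  have hb : (PySem.List.sorted2 T (fun t => t.1) (fun t => t.2.1))
      = T.foldl (fun acc x => PySem.List.insertBy pvBefore x acc) [] := rfl
  rw [hb]
  have key : ∀ (l : List (Int × Int × Int)) (acc : List (Int × Int × Int)), acc.Pairwise pvLe →
      (l.foldl (fun acc x => PySem.List.insertBy pvBefore x acc) acc).Pairwise pvLe := by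
    intro l
    induction l with
    | nil => intro acc h; exact h
    | cons a l ih => intro acc h; exact ih _ (pv_insertBy_pairwise a acc h)
  exact key T [] List.Pairwise.nil

lemma pv_T_pairwise_idx (datax datay : List Int) :
    (pvT datax datay).Pairwise (fun a b => a.2.1 < b.2.1) :=
  List.Pairwise.map pvEmb (fun _ _ hab => hab) (PySem.List.pairwise_lt_enumerate (datax.zip datay) 0)

-- the index component determines a member of pvT
lemma pv_idx_inj {T : List (Int × Int × Int)} (hT : T.Pairwise (fun a b => a.2.1 < b.2.1))
    {t u : Int × Int × Int} (ht : t ∈ T) (hu : u ∈ T) (he : t.2.1 = u.2.1) : t = u := by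
  induction T with
  | nil => cases ht
  | cons a T ih =>
    rw [List.pairwise_cons] at hT
    rcases List.mem_cons.mp ht with h1 | h1 <;> rcases List.mem_cons.mp hu with h2 | h2
    · rw [h1, h2]
    · exact absurd he (by have := hT.1 u h2; rw [h1]; omega)
    · exact absurd he (by have := hT.1 t h1; rw [h2]; omega)
    · exact ih hT.2 h1 h2

-- find? on a pvLe-sorted list returns a pvLe-minimal satisfier
lemma pv_find_min {S : List (Int × Int × Int)} (hp : S.Pairwise pvLe) {P : (Int × Int × Int) → Bool}
    {t : Int × Int × Int} (h : S.find? P = some t) :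
    P t = true ∧ t ∈ S ∧ ∀ u ∈ S, P u = true → pvLe t u := by
  obtain ⟨hPt, as, bs, hS, hns⟩ := List.find?_eq_some_iff_append.mp h
  subst hS
  refine ⟨hPt, by simp, ?_⟩
  intro u hu hPu
  rcases List.mem_append.mp hu with h1 | h1
  · exact absurd hPu (by simpa using hns u h1)
  · rcases List.mem_cons.mp h1 with h2 | h2
    · subst h2; unfold pvLe; omega
    · have hq := (List.pairwise_append.mp hp).2.1
      rw [List.pairwise_cons] at hq
      exact hq.1 u h2

lemma pv_map_y (datax datay : List Int) (hlen : datax.length = datay.length) :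
    (pvT datax datay).map (fun t => t.2.2) = datay := by
  have h1 : ((fun t : Int × Int × Int => t.2.2) ∘ pvEmb)
      = ((fun q : Int × Int => q.2) ∘ (fun p : Int × (Int × Int) => p.2)) := rfl
  have h2 : (fun q : Int × Int => q.2) = (Prod.snd : Int × Int → Int) := rfl
  rw [pvT, List.map_map, h1, ← List.map_map, PySem.List.map_snd_enumerate, h2,
      List.map_snd_zip (by omega)]

-- the per-hull-point steps agree whenever the window is nonempty
lemma pv_step_eq (datax datay : List Int) (h : Int)
    (hw : ∃ yv ∈ datay, (h - yv).natAbs ≤ 20) (hlen : datax.length = datay.length)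
    (st : List Int × List Int) :
    pvStepA datax datay st h = pvStepB datax datay st h := by
  obtain ⟨yv, hyvm, hyv⟩ := hw
  rw [← pv_map_y datax datay hlen] at hyvm
  obtain ⟨t0, ht0T, ht0y⟩ := List.mem_map.mp hyvm
  have hPt0 : pvP h t0 = true := by simp [pvP]; omega
  have ht0W : t0 ∈ pvWin datax datay h := List.mem_filter.mpr ⟨ht0T, hPt0⟩
  have hWpair : (pvWin datax datay h).Pairwise (fun a b => a.2.1 < b.2.1) :=
    List.Pairwise.filter _ (pv_T_pairwise_idx datax datay)
  obtain ⟨m, hmin⟩ : ∃ m, PySem.List.min? ((pvWin datax datay h).map (fun t => t.1)) (fun x => x) = some m := by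
    cases hc : PySem.List.min? ((pvWin datax datay h).map (fun t => t.1)) (fun x => x) with
    | none =>
        exfalso
        have := (PySem.List.min?_eq_none_iff _ _).mp hc
        rw [List.map_eq_nil_iff] at this
        rw [this] at ht0W; cases ht0W
    | some m => exact ⟨m, rfl⟩
  obtain ⟨k, hidx⟩ : ∃ k, PySem.List.index? ((pvWin datax datay h).map (fun t => t.1)) m = some k := by
    have hm := PySem.List.min?_mem hmin
    have := (PySem.List.index?_isSome_iff _ m).mpr hm
    cases hc : PySem.List.index? ((pvWin datax datay h).map (fun t => t.1)) m with
    | none => rw [hc] at this; cases this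
    | some k => exact ⟨k, rfl⟩
  obtain ⟨hk, hmdk, hnot⟩ := PySem.List.getElem_of_index?_eq_some hidx
  have hkW : k < (pvWin datax datay h).length := by simpa using hk
  rw [List.getElem_map] at hmdk
  have hselT : (pvWin datax datay h)[k] ∈ pvT datax datay :=
    (List.mem_filter.mp (List.getElem_mem hkW)).1
  have hselP : pvP h ((pvWin datax datay h)[k]) = true :=
    (List.mem_filter.mp (List.getElem_mem hkW)).2
  have hselmin : ∀ u ∈ pvT datax datay, pvP h u = true → pvLe ((pvWin datax datay h)[k]) u := by
    intro u huT hPu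
    unfold pvLe
    have huW : u ∈ pvWin datax datay h := List.mem_filter.mpr ⟨huT, hPu⟩
    have hmu : m ≤ u.1 :=
      PySem.List.min?_isMin hmin u.1 (List.mem_map_of_mem huW)
    rcases lt_or_eq_of_le hmu with hlt | heq
    · exact Or.inl (by omega)
    · obtain ⟨j, hjW, hWj⟩ := List.mem_iff_getElem.mp huW
      rcases lt_trichotomy j k with hjk | hjk | hjk
      · exfalso
        apply hnot j (by simpa using hjk)
        rw [List.getElem_map, hWj, ← heq]
      · subst hjk
        rw [← hWj]
        exact Or.inr ⟨rfl, le_refl _⟩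
      · have hp := List.pairwise_iff_getElem.mp hWpair k j hkW hjW hjk
        rw [hWj] at hp
        exact Or.inr ⟨by omega, by omega⟩
  have hperm := PySem.List.sorted2_perm (pvT datax datay) (fun t => t.1) (fun t => t.2.1) false
  obtain ⟨t, hfind⟩ : ∃ t, (PySem.List.sorted2 (pvT datax datay) (fun t => t.1) (fun t => t.2.1)).find? (pvP h) = some t := by
    have hex : ((PySem.List.sorted2 (pvT datax datay) (fun t => t.1) (fun t => t.2.1)).find? (pvP h)).isSome = true :=
      List.find?_isSome.mpr ⟨t0, hperm.mem_iff.mpr ht0T, hPt0⟩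
    cases hc : (PySem.List.sorted2 (pvT datax datay) (fun t => t.1) (fun t => t.2.1)).find? (pvP h) with
    | none => rw [hc] at hex; cases hex
    | some t => exact ⟨t, rfl⟩
  obtain ⟨hPt, htS, htmin⟩ := pv_find_min (pv_sorted2_pairwise (pvT datax datay)) hfind
  have htT : t ∈ pvT datax datay := hperm.mem_iff.mp htS
  have h1 : pvLe t ((pvWin datax datay h)[k]) := htmin _ (hperm.mem_iff.mpr hselT) hselP
  have h2 : pvLe ((pvWin datax datay h)[k]) t := hselmin t htT hPt
  have hteq : t = (pvWin datax datay h)[k] :=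
    pv_idx_inj (pv_T_pairwise_idx datax datay) htT hselT (by unfold pvLe at h1 h2; omega)
  have e1 : PySem.List.pyGetD ((pvWin datax datay h).map (fun t => t.1)) (k : Int) 0
      = ((pvWin datax datay h)[k]).1 := by
    rw [PySem.List.pyGetD_natCast, List.getD_eq_getElem _ _ hk, List.getElem_map]
  have e2 : PySem.List.pyGetD ((pvWin datax datay h).map (fun t => t.2.2)) (k : Int) 0
      = ((pvWin datax datay h)[k]).2.2 := by
    have hk2 : k < ((pvWin datax datay h).map (fun t => t.2.2)).length := by simpa using hkW
    rw [PySem.List.pyGetD_natCast, List.getD_eq_getElem _ _ hk2, List.getElem_map]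
  unfold pvStepA pvStepB
  simp only [hmin, hidx, hfind, hteq, e1, e2]

-- ===== VERDICT (by name: the statement is the Claim_ definition above) =====
theorem FindLeftPoint_spec : Claim_equal_FindLeftPoint := by
  intro dataHullx dataHully datax datay _ hpre
  obtain ⟨hlen, _, hwin⟩ := hpre
  unfold Spec_FindLeftPoint
  rw [pv_A_eq dataHullx dataHully datax datay hlen, pv_B_eq dataHullx dataHully datax datay]
  exact PySem.List.foldl_congr_mem dataHully _ _ _
    (fun st h hh => pv_step_eq datax datay h (hwin h hh) hlen st)
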